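-- pv_equiv track=rewrite | github.com/SidneyGomes/CG-Project | OpenImage/filtros.py | roberts_cruzado
-- ===== SOURCE A (Python) =====
-- def roberts_cruzado(multiplica_matriz):
--
--     mascara_x = [[0, 0, 0], [0, 1, 0], [0, 0, -1]]
--     mascara_y = [[0, 0, 0], [0, 0, 1], [0, -1, 0]]
--
--     soma_x = 0
--     soma_y = 0
--
--     for k in range(len(mascara_x)):
--         for l in range(len(mascara_x)):
--             soma_x += (multiplica_matriz[k][l] * mascara_x[k][l])
--             soma_y += (multiplica_matriz[k][l] * mascara_y[k][l])
--
--     magnitude = soma_x + soma_y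
--
--     if magnitude > 255:
--         magnitude = 255
--     elif magnitude < 0:
--         magnitude = 0
--
--     return magnitude
-- ===== SOURCE B (Python) =====
-- def roberts_cruzado(multiplica_matriz):
--     # Only the four nonzero mask cells contribute; read them directly.
--     soma_x = multiplica_matriz[1][1] - multiplica_matriz[2][2]
--     soma_y = multiplica_matriz[1][2] - multiplica_matriz[2][1]
--     return min(255, max(0, soma_x + soma_y))
-- ===== Notes on version B (the rewrite author's own statement) =====
-- stated objective: simpler
-- what changed: Drops the two 3x3 mask matrices and the 9-iteration nested loop; reads the four nonzero mask positions directly and clamps with min/max.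
import Mathlib
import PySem

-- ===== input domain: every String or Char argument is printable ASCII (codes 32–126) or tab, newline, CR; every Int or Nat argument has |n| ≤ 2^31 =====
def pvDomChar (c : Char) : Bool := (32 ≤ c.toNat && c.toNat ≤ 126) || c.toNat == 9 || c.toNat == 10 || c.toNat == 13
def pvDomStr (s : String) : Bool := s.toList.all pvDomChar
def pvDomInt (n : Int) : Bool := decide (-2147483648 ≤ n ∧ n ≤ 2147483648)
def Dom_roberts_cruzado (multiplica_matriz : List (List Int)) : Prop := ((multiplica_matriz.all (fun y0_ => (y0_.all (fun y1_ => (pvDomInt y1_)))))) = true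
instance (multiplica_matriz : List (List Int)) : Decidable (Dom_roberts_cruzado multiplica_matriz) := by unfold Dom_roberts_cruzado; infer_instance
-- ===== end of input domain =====

-- B drops the two mask matrices and the nested loop, reading the four nonzero mask cells directly (objective: simpler).


-- ===== PORT A =====
def roberts_cruzado (multiplica_matriz : List (List Int)) : Int :=
  let mascara_x : List (List Int) := [[0, 0, 0], [0, 1, 0], [0, 0, -1]]
  let mascara_y : List (List Int) := [[0, 0, 0], [0, 0, 1], [0, -1, 0]]
  let s := (PySem.List.pyRange 0 (mascara_x.length) 1).foldl (fun (s : Int × Int) k =>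
    (PySem.List.pyRange 0 (mascara_x.length) 1).foldl (fun (s : Int × Int) l =>
      (s.1 + PySem.List.pyGetD (PySem.List.pyGetD multiplica_matriz k []) l 0 *
               PySem.List.pyGetD (PySem.List.pyGetD mascara_x k []) l 0,
       s.2 + PySem.List.pyGetD (PySem.List.pyGetD multiplica_matriz k []) l 0 *
               PySem.List.pyGetD (PySem.List.pyGetD mascara_y k []) l 0)) s) ((0 : Int), (0 : Int))
  let magnitude := s.1 + s.2
  if magnitude > 255 then 255 else if magnitude < 0 then 0 else magnitude

-- ===== PORT B =====
def roberts_cruzado_alt (multiplica_matriz : List (List Int)) : Int :=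
  let soma_x := PySem.List.pyGetD (PySem.List.pyGetD multiplica_matriz 1 []) 1 0 -
                PySem.List.pyGetD (PySem.List.pyGetD multiplica_matriz 2 []) 2 0
  let soma_y := PySem.List.pyGetD (PySem.List.pyGetD multiplica_matriz 1 []) 2 0 -
                PySem.List.pyGetD (PySem.List.pyGetD multiplica_matriz 2 []) 1 0
  min 255 (max 0 (soma_x + soma_y))

-- ===== PRECONDITION & SPEC =====
-- Pre_ excludes exactly the inputs where A raises IndexError: the 3x3 block must exist.
def Pre_roberts_cruzado (multiplica_matriz : List (List Int)) : Prop :=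
  3 ≤ multiplica_matriz.length ∧
  3 ≤ (multiplica_matriz.getD 0 []).length ∧
  3 ≤ (multiplica_matriz.getD 1 []).length ∧
  3 ≤ (multiplica_matriz.getD 2 []).length
instance (multiplica_matriz : List (List Int)) : Decidable (Pre_roberts_cruzado multiplica_matriz) := by
  unfold Pre_roberts_cruzado; infer_instance

def pvWitness_roberts_cruzado : List (List Int) := [[1, 2, 3], [4, 5, 6], [7, 8, 9]]

def Spec_roberts_cruzado (multiplica_matriz : List (List Int)) (out : Int) : Prop := out = roberts_cruzado_alt multiplica_matriz
instance (multiplica_matriz : List (List Int)) (out : Int) : Decidable (Spec_roberts_cruzado multiplica_matriz out) := by unfold Spec_roberts_cruzado; infer_instance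

-- ===== CLAIM (what is proved, stated in full; the proofs are below) =====
def Claim_equal_roberts_cruzado : Prop := ∀ (multiplica_matriz : List (List Int)), Dom_roberts_cruzado multiplica_matriz → Pre_roberts_cruzado multiplica_matriz → Spec_roberts_cruzado multiplica_matriz (roberts_cruzado multiplica_matriz)

-- ===== LEMMAS AND PROOFS =====

-- ===== VERDICT (by name: the statement is the Claim_ definition above) =====
set_option maxHeartbeats 1000000 in
theorem roberts_cruzado_spec : Claim_equal_roberts_cruzado := by
  intro m _ hpre
  obtain ⟨h0, h1, h2, h3⟩ := hpre
  rcases m with _ | ⟨r0, _ | ⟨r1, _ | ⟨r2, mt⟩⟩⟩ <;> simp at h0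
  simp only [List.getD] at h1 h2 h3
  simp at h1 h2 h3
  rcases r0 with _ | ⟨a, _ | ⟨b, _ | ⟨c, t0⟩⟩⟩ <;> simp at h1
  rcases r1 with _ | ⟨d, _ | ⟨e, _ | ⟨f, t1⟩⟩⟩ <;> simp at h2
  rcases r2 with _ | ⟨g, _ | ⟨h, _ | ⟨i, t2⟩⟩⟩ <;> simp at h3
  unfold Spec_roberts_cruzado
  simp only [roberts_cruzado, roberts_cruzado_alt, List.length_cons, List.length_nil]
  rw [show (PySem.List.pyRange 0 ((3 : Nat) : Int) 1) = [0, 1, 2] from by decide]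
  simp only [List.foldl]
  simp [pysem]
  omega
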